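-- pv_equiv track=rewrite | github.com/mahlberg-lab/clic | server/clic/region/utils.py | regions_invert
-- ===== SOURCE A (Python) =====
-- def regions_invert(rlist, full_length=None):
--     """
--     Given a list of regions, return the inverse. If full_length not given, ignore first and last extremities
--
--         >>> list(regions_invert([], 100))
--         [(0, 100)]
--
--         >>> list(regions_invert([]))
--         []
--
--         >>> list(regions_invert([(10, 20), (50, 60)], 100))
--         [(0, 10), (20, 50), (60, 100)]
--
--         >>> list(regions_invert([(10, 20), (50, 60)]))
--         [(20, 50)]
--
--         >>> list(regions_invert([(0, 0), (10, 15), (15, 20), (50, 50)], 100))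
--         [(0, 10), (20, 50), (50, 100)]
--     """
--     last_b = None
--     for r in rlist:
--         b = r[0]
--         if last_b is None:
--             if full_length and b > 0:
--                 yield (0, b)
--         elif b > last_b:
--             yield (last_b, b)
--         last_b = r[1]
--     if full_length and full_length > (last_b or 0):
--         yield (last_b or 0, full_length)
-- ===== SOURCE B (Python) =====
-- def regions_invert(rlist, full_length=None):
--     # Flatten regions into a boundary-point sequence, then read off gaps as
--     # consecutive point pairs at even offsets.
--     pts = [x for r in rlist for x in (r[0], r[1])]
--     if full_length:
--         pts = [0] + pts + [full_length]
--     else: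
--         pts = pts[1:-1]
--     for i in range(0, len(pts) - 1, 2):
--         if pts[i + 1] > pts[i]:
--             yield (pts[i], pts[i + 1])
-- ===== Notes on version B (the rewrite author's own statement) =====
-- stated objective: alternative
-- what changed: Instead of A's stateful loop tracking the previous region's end, B flattens the regions into one boundary-point list, augments it with 0 and full_length (or strips the outer extremities when full_length is falsy), and reads gaps off as increasing point pairs at even offsets.
import Mathlib
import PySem

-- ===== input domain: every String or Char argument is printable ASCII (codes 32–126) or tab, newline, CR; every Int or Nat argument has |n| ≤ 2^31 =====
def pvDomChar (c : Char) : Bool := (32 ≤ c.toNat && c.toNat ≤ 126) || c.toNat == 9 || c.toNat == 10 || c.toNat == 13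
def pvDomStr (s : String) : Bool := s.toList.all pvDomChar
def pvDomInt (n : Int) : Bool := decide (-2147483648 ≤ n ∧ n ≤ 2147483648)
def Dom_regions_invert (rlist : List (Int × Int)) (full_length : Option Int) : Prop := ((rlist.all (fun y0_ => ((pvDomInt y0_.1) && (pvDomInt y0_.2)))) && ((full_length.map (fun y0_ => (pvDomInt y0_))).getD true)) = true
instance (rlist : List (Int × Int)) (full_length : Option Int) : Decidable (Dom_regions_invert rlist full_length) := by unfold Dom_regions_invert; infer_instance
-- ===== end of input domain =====

-- B rebuilds the result from a flattened boundary-point list (augmented with 0/full_length or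
-- stripped of the outer extremities) read off in stride-2 pairs, instead of A's stateful last_b loop;
-- equivalence is about the yielded values (both are generators).


-- ===== PORT A =====
def pyTruthy (o : Option Int) : Bool :=
  match o with
  | none => false
  | some n => n != 0

-- step of A's for-loop: state = (accumulated yields, last_b)
def riStep (full_length : Option Int) (st : List (Int × Int) × Option Int) (r : Int × Int) :
    List (Int × Int) × Option Int :=
  match st with
  | (acc, none) =>
    (if pyTruthy full_length && decide (r.1 > 0) then acc ++ [(0, r.1)] else acc, some r.2)
  | (acc, some lb) =>
    (if decide (r.1 > lb) then acc ++ [(lb, r.1)] else acc, some r.2)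

def regions_invert (rlist : List (Int × Int)) (full_length : Option Int) : List (Int × Int) :=
  let st := rlist.foldl (riStep full_length) ([], none)
  let lb0 : Int := st.2.getD 0
  if pyTruthy full_length && decide (full_length.getD 0 > lb0) then st.1 ++ [(lb0, full_length.getD 0)]
  else st.1


-- ===== PORT B =====
-- the stride-2 read-off loop: 'for i in range(0, len(pts)-1, 2): if pts[i+1] > pts[i]: yield …'
def pairGaps : List Int → List (Int × Int)
  | a :: b :: rest => (if b > a then [(a, b)] else []) ++ pairGaps rest
  | _ => []

def regions_invert_alt (rlist : List (Int × Int)) (full_length : Option Int) : List (Int × Int) :=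
  let pts := rlist.flatMap (fun r => [r.1, r.2])
  let pts :=
    if pyTruthy full_length then 0 :: pts ++ [full_length.getD 0]
    else PySem.List.slice pts (some 1) (some (-1))   -- pts[1:-1]
  pairGaps pts


-- ===== PRECONDITION & SPEC =====
def Spec_regions_invert (rlist : List (Int × Int)) (full_length : Option Int) (out : List (Int × Int)) : Prop := out = regions_invert_alt rlist full_length
instance (rlist : List (Int × Int)) (full_length : Option Int) (out : List (Int × Int)) : Decidable (Spec_regions_invert rlist full_length out) := by unfold Spec_regions_invert; infer_instance

-- ===== CLAIM (what is proved, stated in full; the proofs are below) =====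
def Claim_equal_regions_invert : Prop := ∀ (rlist : List (Int × Int)) (full_length : Option Int), Dom_regions_invert rlist full_length → Spec_regions_invert rlist full_length (regions_invert rlist full_length)

-- ===== LEMMAS AND PROOFS =====

-- reference gap list: gaps of l given that the previous region ended at lb
def riGaps (lb : Int) : List (Int × Int) → List (Int × Int)
  | [] => []
  | r :: rs => (if r.1 > lb then [(lb, r.1)] else []) ++ riGaps r.2 rs

-- end of the last region, lb if none
def riLast (lb : Int) : List (Int × Int) → Int
  | [] => lb
  | r :: rs => riLast r.2 rs

theorem riStep_foldl (fl : Option Int) (l : List (Int × Int)) :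
    ∀ (acc : List (Int × Int)) (lb : Int),
      l.foldl (riStep fl) (acc, some lb) = (acc ++ riGaps lb l, some (riLast lb l)) := by
  induction l with
  | nil => intro acc lb; simp [riGaps, riLast]
  | cons r rs ih =>
    intro acc lb
    simp only [List.foldl_cons, riStep, riGaps, riLast]
    by_cases h : r.1 > lb <;> simp [h, ih]

theorem pairGaps_flat (l : List (Int × Int)) :
    ∀ (lb : Int) (suffix : List Int),
      pairGaps (lb :: l.flatMap (fun r => [r.1, r.2]) ++ suffix) =
        riGaps lb l ++ pairGaps (riLast lb l :: suffix) := by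
  induction l with
  | nil => intro lb suffix; simp [riGaps, riLast]
  | cons r rs ih =>
    intro lb suffix
    simp only [List.flatMap_cons, riGaps, riLast, List.cons_append, List.append_assoc,
      List.nil_append]
    simp only [pairGaps]
    exact congrArg (fun z => (if r.1 > lb then [(lb, r.1)] else []) ++ z) (ih r.2 suffix)

theorem pairGaps_dropLast (l : List (Int × Int)) :
    ∀ (lb : Int), pairGaps ((lb :: l.flatMap (fun r => [r.1, r.2])).dropLast) = riGaps lb l := by
  induction l with
  | nil => intro lb; simp [pairGaps, riGaps]
  | cons r rs ih =>
    intro lb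
    simp only [List.flatMap_cons, riGaps, List.cons_append, List.nil_append]
    rw [List.dropLast_cons_of_ne_nil (by simp), List.dropLast_cons_of_ne_nil (by simp)]
    by_cases h : r.1 > lb <;> simp [pairGaps, h, ih r.2]

theorem slice_one_neg_one (xs : List Int) :
    PySem.List.slice xs (some 1) (some (-1)) = xs.tail.dropLast := by
  cases xs with
  | nil => simp [PySem.List.slice]
  | cons a t =>
    simp [PySem.List.slice, PySem.List.clampIdx]
    cases t with
    | nil => simp
    | cons b t' =>
      have hneg : ¬ ((t'.length : Int) + 1 < 0) := by omega
      simp [List.dropLast_eq_take, hneg]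


-- ===== VERDICT (by name: the statement is the Claim_ definition above) =====
theorem regions_invert_spec : Claim_equal_regions_invert := by
  intro rlist full_length _
  unfold Spec_regions_invert regions_invert regions_invert_alt
  by_cases hfl : pyTruthy full_length
  · cases rlist with
    | nil =>
      simp only [hfl, List.flatMap_nil, List.foldl_nil, if_true, List.nil_append]
      simp [pairGaps]
    | cons h t =>
      simp only [List.foldl_cons, riStep, riStep_foldl, hfl, if_true]
      rw [pairGaps_flat (h :: t) 0 [full_length.getD 0]]
      simp only [riGaps, riLast, pairGaps, Option.getD_some]
      by_cases h1 : h.1 > 0 <;>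
        by_cases h2 : full_length.getD 0 > riLast h.2 t <;>
          simp [h1, h2]
  · cases rlist with
    | nil => simp [pairGaps, hfl, PySem.List.slice]
    | cons h t =>
      simp only [Bool.not_eq_true] at hfl
      simp only [List.foldl_cons, riStep, riStep_foldl, hfl, Bool.false_and]
      rw [slice_one_neg_one]
      simp only [List.flatMap_cons, List.cons_append, List.nil_append, List.tail_cons]
      simp [pairGaps_dropLast t h.2]
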